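-- pv_equiv track=rewrite | github.com/matteomancanelli/syft4golog | benchmarks/gen_benchmarks/gen_benchmarks_coffee_line.py | write_program_exp3
-- ===== SOURCE A (Python) =====
-- from collections import deque, defaultdict
--
-- def build_graph(line_dim, shortcuts, bidir=True):
--     G = defaultdict(set)
--
--     # line edges
--     for i in range(line_dim):
--         u, v = i, i+1
--         G[u].add(v)
--         if bidir:
--             G[v].add(u)
--
--     # shortcut edges
--     for (a,b) in shortcuts:
--         if a <= line_dim and b <= line_dim and a != b:
--             G[a].add(b)
--             if bidir:
--                 G[b].add(a)
--
--     return G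
--
-- def bfs_path(G, start, goal):
--     q = deque([start])
--     parent = {start: None}
--
--     while q:
--         u = q.popleft()
--         if u == goal:
--             break
--         for v in G[u]:
--             if v not in parent:
--                 parent[v] = u
--                 q.append(v)
--
--     if goal not in parent:
--         return None  # unreachable
--     # reconstruct
--     path = []
--     cur = goal
--     while cur is not None:
--         path.append(cur)
--         cur = parent[cur]
--     path.reverse()
--     return path  # list of nodes
--
-- def moves_from_path(path):
--     # path nodes are ints, 0 is kitchen l0, others are offices l1..ln
--     moves = []
--     for u, v in zip(path, path[1:]):
--         moves.append(f"move_l{u}_l{v}")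
--     return moves
--
-- def write_program_exp3(shortcuts, line_dim):
--     G = build_graph(line_dim, shortcuts, bidir=True)
--
--     parts = []
--     for i in range(1, line_dim+1):
--         p = bfs_path(G, 0, i)
--         if p is None:
--             continue  # or raise, depending on what you want
--         go = " ; ".join(moves_from_path(p))
--         back = " ; ".join(moves_from_path(list(reversed(p))))
--         parts.append(
--             f"(prepare_coffee_l0 ; {go} ; put_coffee_l{i} ; (nil | put_coffee_fair_l{i}) ; {back})"
--         )
--
--     body = "(" + " ; ".join(parts) + ")"
--     final_condition = "[" + " && ".join([f"coffee_at_l{i}" for i in range(1, line_dim+1)]) + "]?"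
--     return body + " ; " + final_condition
-- ===== SOURCE B (Python) =====
-- def write_program_exp3(shortcuts, line_dim):
--     # index the valid shortcuts once: node -> shortcut neighbours in arrival order
--     pend = {}
--     for a, b in shortcuts:
--         if a <= line_dim and b <= line_dim and a != b:
--             pend.setdefault(a, []).append(b)
--             pend.setdefault(b, []).append(a)
--
--     def neighbours(u):
--         s = set()
--         if 1 <= u <= line_dim:
--             s.add(u - 1)
--         if 0 <= u < line_dim:
--             s.add(u + 1)
--         for w in pend.get(u, ()):
--             s.add(w)
--         return s
--
--     # ONE BFS from the kitchen over the whole graph: a shared parent tree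
--     parent = {0: None}
--     order = [0]
--     head = 0
--     while head < len(order):
--         u = order[head]
--         head += 1
--         for v in neighbours(u):
--             if v not in parent:
--                 parent[v] = u
--                 order.append(v)
--
--     parts = []
--     for i in range(1, line_dim + 1):
--         if i not in parent:
--             continue
--         # edge list of the return trip, read straight off the parent tree
--         pairs = []
--         c = i
--         while parent[c] is not None:
--             pairs.append((c, parent[c]))
--             c = parent[c]
--         back = " ; ".join(f"move_l{c}_l{p}" for c, p in pairs)
--         go = " ; ".join(f"move_l{p}_l{c}" for c, p in reversed(pairs))
--         parts.append(
--             f"(prepare_coffee_l0 ; {go} ; put_coffee_l{i} ; (nil | put_coffee_fair_l{i}) ; {back})"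
--         )
--
--     body = "(" + " ; ".join(parts) + ")"
--     final_condition = "[" + " && ".join(f"coffee_at_l{i}" for i in range(1, line_dim + 1)) + "]?"
--     return body + " ; " + final_condition
-- ===== Notes on version B (the rewrite author's own statement) =====
-- stated objective: alternative
-- what changed: B runs ONE BFS from node 0 and reads every target's path off the shared parent tree (A re-runs a BFS per target), indexes the valid shortcuts once and builds each node's neighbour set on demand instead of materialising the whole adjacency dict, and emits each path directly as an edge list; since the output string itself is quadratic in line_dim, both stay output-bound and a timing run read only ~1.2x, so no speed is claimed.
import Mathlib
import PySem

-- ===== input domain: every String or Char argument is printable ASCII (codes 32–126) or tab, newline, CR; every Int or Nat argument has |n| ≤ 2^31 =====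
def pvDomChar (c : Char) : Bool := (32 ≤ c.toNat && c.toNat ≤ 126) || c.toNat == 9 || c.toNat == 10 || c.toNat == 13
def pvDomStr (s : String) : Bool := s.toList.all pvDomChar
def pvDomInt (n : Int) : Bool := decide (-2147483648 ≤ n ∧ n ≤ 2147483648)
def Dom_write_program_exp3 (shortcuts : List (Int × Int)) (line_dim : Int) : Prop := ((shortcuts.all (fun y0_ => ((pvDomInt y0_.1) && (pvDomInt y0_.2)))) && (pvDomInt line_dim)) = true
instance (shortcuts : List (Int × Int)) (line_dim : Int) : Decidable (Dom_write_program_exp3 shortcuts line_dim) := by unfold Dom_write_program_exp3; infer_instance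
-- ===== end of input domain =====

-- B replaces A's per-target BFS (one breadth-first search from node 0 for every office
-- 1..line_dim) by ONE BFS from node 0 whose shared parent tree yields every target's path;
-- B also never materialises the whole graph: it indexes the valid shortcuts once and builds
-- each node's neighbour set on demand, and it reads each path off as an edge list directly.
-- Both Pythons iterate over CPython `set`s of ints, whose hash-table iteration order the
-- chosen shortest paths (hence the output string) depend on; the helpers pvHash..pvSetToList
-- below are an exact model of CPython's int-set probing/resizing — a shared semantic
-- primitive (like the PySem prelude), used by both ports.

-- ===== CPython int-set model (shared semantic primitive) =====

def pvHash (x : Int) : Int := if x = -1 then -2 else x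

def pvScan (t : Array (Option Int)) (key : Int) (j : Nat) : Nat → Option (Nat × Bool)
  | 0 => none
  | c + 1 =>
    match t.getD j none with
    | none => some (j, true)
    | some e => if e = key then some (j, false) else pvScan t key (j + 1) c

def pvProbe (t : Array (Option Int)) (key : Int) : Nat → Nat → Nat → Nat × Bool
  | 0, _, _ => (0, false)
  | f + 1, i, perturb =>
    let mask := t.size - 1
    let probes := if i + 9 ≤ mask then 9 else 0
    match pvScan t key i (probes + 1) with
    | some r => r
    | none =>
      let p := perturb >>> 5
      pvProbe t key f ((i * 5 + 1 + p) % t.size) p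

def pvNewSizeGo (minused : Nat) : Nat → Nat → Nat
  | 0, n => n
  | f + 1, n => if n ≤ minused then pvNewSizeGo minused f (2 * n) else n

def pvNewSize (minused : Nat) : Nat := pvNewSizeGo minused (minused + 8) 8

structure PvSet where
  table : Array (Option Int)
  fill : Nat
deriving Repr

def pvSetEmpty : PvSet := ⟨(List.replicate 8 (none : Option Int)).toArray, 0⟩

def pvStart (t : Array (Option Int)) (h : Int) : Nat := (PySem.Int.mod h (Int.ofNat t.size)).toNat
def pvPerturb0 (h : Int) : Nat := (PySem.Int.mod h (2 ^ 64 : Int)).toNat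

def pvClean (t : Array (Option Int)) (key : Int) : Array (Option Int) :=
  let h := pvHash key
  t.setIfInBounds (pvProbe t key (t.size + 64) (pvStart t h) (pvPerturb0 h)).1 (some key)

def pvResize (s : PvSet) (minused : Nat) : PvSet :=
  let t0 : Array (Option Int) := (List.replicate (pvNewSize minused) none).toArray
  ⟨s.table.toList.foldl (fun t e => match e with | none => t | some k => pvClean t k) t0, s.fill⟩

def pvSetAdd (s : PvSet) (key : Int) : PvSet :=
  let h := pvHash key
  let mask := s.table.size - 1
  match pvProbe s.table key (s.table.size + 64) (pvStart s.table h) (pvPerturb0 h) with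
  | (j, true) =>
    let t := s.table.setIfInBounds j (some key)
    let fill := s.fill + 1
    if fill * 5 ≥ mask * 3 then
      pvResize ⟨t, fill⟩ (if fill ≤ 50000 then fill * 4 else fill * 2)
    else ⟨t, fill⟩
  | (_, false) => s

def pvSetToList (s : PvSet) : List Int := s.table.toList.filterMap id

-- fuel bounding the number of pops of both BFS while-loops (a shared totality device:
-- any bound ≥ 1 + 2·(number of possible nodes) is sufficient, and the proof never needs it)
def pvFuel (shortcuts : List (Int × Int)) (line_dim : Int) : Nat :=
  3 + 2 * ((PySem.List.pyRange 0 (line_dim + 1) 1).length + 2 * shortcuts.length)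

-- ===== PORT A =====

def pvGraphAdd (G : PySem.Dict Int PvSet) (u v : Int) : PySem.Dict Int PvSet :=
  G.insert u (pvSetAdd (G.getD u pvSetEmpty) v)

def pvBuildGraph (shortcuts : List (Int × Int)) (line_dim : Int) : PySem.Dict Int PvSet :=
  let G := (PySem.List.pyRange 0 line_dim 1).foldl
    (fun G i => pvGraphAdd (pvGraphAdd G i (i + 1)) (i + 1) i) PySem.Dict.empty
  shortcuts.foldl
    (fun G p =>
      if p.1 ≤ line_dim ∧ p.2 ≤ line_dim ∧ p.1 ≠ p.2 then
        pvGraphAdd (pvGraphAdd G p.1 p.2) p.2 p.1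
      else G) G

def pvNbrs (G : PySem.Dict Int PvSet) (u : Int) : List Int := pvSetToList (G.getD u pvSetEmpty)

-- the inner `for v in G[u]: if v not in parent: …` loop of A's bfs_path
def pvBfsPush (u : Int) (qp : List Int × PySem.Dict Int (Option Int)) (v : Int) :
    List Int × PySem.Dict Int (Option Int) :=
  if qp.2.contains v then qp else (qp.1 ++ [v], qp.2.insert v (some u))

def pvBfsStep (G : PySem.Dict Int PvSet) (u : Int) (q : List Int)
    (p : PySem.Dict Int (Option Int)) : List Int × PySem.Dict Int (Option Int) :=
  (pvNbrs G u).foldl (pvBfsPush u) (q, p)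

-- A's bfs while-loop: breaks as soon as the goal node is popped
def pvBfsLoopA (G : PySem.Dict Int PvSet) (goal : Int) :
    Nat → List Int → PySem.Dict Int (Option Int) → PySem.Dict Int (Option Int)
  | 0, _, p => p
  | _ + 1, [], p => p
  | f + 1, u :: q, p =>
    if u = goal then p
    else
      match pvBfsStep G u q p with
      | (q', p') => pvBfsLoopA G goal f q' p'

-- A's `while cur is not None` node walk (reversed afterwards)
def pvWalk (p : PySem.Dict Int (Option Int)) : Nat → Option Int → List Int → List Int
  | 0, _, acc => acc
  | _ + 1, none, acc => acc
  | f + 1, some c, acc => pvWalk p f (p.getD c none) (acc ++ [c])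

def pvMoves (path : List Int) : List String :=
  (path.zip path.tail).map (fun uv => "move_l" ++ PySem.Int.toStr uv.1 ++ "_l" ++ PySem.Int.toStr uv.2)

def pvBfsPath (G : PySem.Dict Int PvSet) (fuel : Nat) (start goal : Int) : Option (List Int) :=
  let p := pvBfsLoopA G goal fuel [start] (PySem.Dict.empty.insert start none)
  if p.contains goal then some ((pvWalk p (p.size + 1) (some goal) []).reverse) else none

-- one iteration of A's parts loop (the `continue` when bfs_path returns None)
def pvPartA (G : PySem.Dict Int PvSet) (fuel : Nat) (parts : List String) (i : Int) : List String :=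
  match pvBfsPath G fuel 0 i with
  | none => parts
  | some p =>
    let go := PySem.Str.join " ; " (pvMoves p)
    let back := PySem.Str.join " ; " (pvMoves p.reverse)
    parts ++ ["(prepare_coffee_l0 ; " ++ go ++ " ; put_coffee_l" ++ PySem.Int.toStr i ++
      " ; (nil | put_coffee_fair_l" ++ PySem.Int.toStr i ++ ") ; " ++ back ++ ")"]

def write_program_exp3 (shortcuts : List (Int × Int)) (line_dim : Int) : String :=
  let G := pvBuildGraph shortcuts line_dim
  let parts := (PySem.List.pyRange 1 (line_dim + 1) 1).foldl
    (pvPartA G (pvFuel shortcuts line_dim)) []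
  let body := "(" ++ PySem.Str.join " ; " parts ++ ")"
  let final := "[" ++ PySem.Str.join " && "
    ((PySem.List.pyRange 1 (line_dim + 1) 1).map (fun i => "coffee_at_l" ++ PySem.Int.toStr i)) ++ "]?"
  body ++ " ; " ++ final

-- ===== PORT B =====

-- the one-pass shortcut index: node -> shortcut neighbours in arrival order
def pvPend (shortcuts : List (Int × Int)) (line_dim : Int) : PySem.Dict Int (List Int) :=
  shortcuts.foldl
    (fun d p =>
      if p.1 ≤ line_dim ∧ p.2 ≤ line_dim ∧ p.1 ≠ p.2 then
        (d.modify p.1 [] (· ++ [p.2])).modify p.2 [] (· ++ [p.1])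
      else d) PySem.Dict.empty

-- a node's neighbour set, built on demand: line neighbours, then indexed shortcut neighbours
def pvNbrsB (pend : PySem.Dict Int (List Int)) (line_dim u : Int) : List Int :=
  let s0 := if 1 ≤ u ∧ u ≤ line_dim then pvSetAdd pvSetEmpty (u - 1) else pvSetEmpty
  let s1 := if 0 ≤ u ∧ u < line_dim then pvSetAdd s0 (u + 1) else s0
  pvSetToList ((pend.getD u []).foldl pvSetAdd s1)

-- B's single full BFS (the `while head < len(order)` loop: recursion on the unread queue)
def pvBfsFull (pend : PySem.Dict Int (List Int)) (line_dim : Int) :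
    Nat → List Int → PySem.Dict Int (Option Int) → PySem.Dict Int (Option Int)
  | 0, _, p => p
  | _ + 1, [], p => p
  | f + 1, u :: q, p =>
    let st := (pvNbrsB pend line_dim u).foldl
      (fun st v => if st.1.contains v then st else (st.1.insert v (some u), st.2 ++ [v])) (p, q)
    pvBfsFull pend line_dim f st.2 st.1

-- B's `while parent[c] is not None` loop: the return trip as an edge list
def pvPairs (p : PySem.Dict Int (Option Int)) : Nat → Int → List (Int × Int)
  | 0, _ => []
  | f + 1, c =>
    match p.getD c none with
    | none => []
    | some v => (c, v) :: pvPairs p f v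

-- render one target's part from the shared parent tree (None = node unreachable, skip)
def pvPartB (parent : PySem.Dict Int (Option Int)) (i : Int) : Option String :=
  if parent.contains i then
    let pairs := pvPairs parent (parent.size + 1) i
    let back := PySem.Str.join " ; "
      (pairs.map (fun cp => "move_l" ++ PySem.Int.toStr cp.1 ++ "_l" ++ PySem.Int.toStr cp.2))
    let go := PySem.Str.join " ; "
      (pairs.reverse.map (fun cp => "move_l" ++ PySem.Int.toStr cp.2 ++ "_l" ++ PySem.Int.toStr cp.1))
    some ("(prepare_coffee_l0 ; " ++ go ++ " ; put_coffee_l" ++ PySem.Int.toStr i ++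
      " ; (nil | put_coffee_fair_l" ++ PySem.Int.toStr i ++ ") ; " ++ back ++ ")")
  else none

def write_program_exp3_alt (shortcuts : List (Int × Int)) (line_dim : Int) : String :=
  let pend := pvPend shortcuts line_dim
  let parent := pvBfsFull pend line_dim (pvFuel shortcuts line_dim) [0]
    (PySem.Dict.empty.insert 0 none)
  let parts := (PySem.List.pyRange 1 (line_dim + 1) 1).filterMap (pvPartB parent)
  let body := "(" ++ PySem.Str.join " ; " parts ++ ")"
  let final := "[" ++ PySem.Str.join " && "
    ((PySem.List.pyRange 1 (line_dim + 1) 1).map (fun i => "coffee_at_l" ++ PySem.Int.toStr i)) ++ "]?"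
  body ++ " ; " ++ final

-- ===== PRECONDITION & SPEC =====
def Spec_write_program_exp3 (shortcuts : List (Int × Int)) (line_dim : Int) (out : String) : Prop := out = write_program_exp3_alt shortcuts line_dim
instance (shortcuts : List (Int × Int)) (line_dim : Int) (out : String) : Decidable (Spec_write_program_exp3 shortcuts line_dim out) := by unfold Spec_write_program_exp3; infer_instance

-- ===== CLAIM (what is proved, stated in full; the proofs are below) =====
def Claim_equal_write_program_exp3 : Prop := ∀ (shortcuts : List (Int × Int)) (line_dim : Int), Dom_write_program_exp3 shortcuts line_dim → Spec_write_program_exp3 shortcuts line_dim (write_program_exp3 shortcuts line_dim)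

-- ===== LEMMAS AND PROOFS =====

-- ---------- proof-side reference BFS loop (A's loop without the break) ----------

def pvBfsLoopB (G : PySem.Dict Int PvSet) :
    Nat → List Int → PySem.Dict Int (Option Int) → PySem.Dict Int (Option Int)
  | 0, _, p => p
  | _ + 1, [], p => p
  | f + 1, u :: q, p =>
    match pvBfsStep G u q p with
    | (q', p') => pvBfsLoopB G f q' p'

-- ---------- the two graph representations give every node the same neighbour list ----------

-- a single stream of "add v to the set of u" operations; A's build is this stream folded
-- into a dict of sets, B's index/on-demand build is its per-node projection
def pvOpsLine (line_dim : Int) : List (Int × Int) :=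
  (PySem.List.pyRange 0 line_dim 1).flatMap (fun i => [(i, i + 1), (i + 1, i)])

def pvOpsShort (shortcuts : List (Int × Int)) (line_dim : Int) : List (Int × Int) :=
  shortcuts.flatMap (fun p =>
    if p.1 ≤ line_dim ∧ p.2 ≤ line_dim ∧ p.1 ≠ p.2 then [(p.1, p.2), (p.2, p.1)] else [])

def pvStep' (u : Int) (s : PvSet) (p : Int × Int) : PvSet :=
  if p.1 = u then pvSetAdd s p.2 else s

lemma pvBridgeA (shortcuts : List (Int × Int)) (line_dim : Int) :
    pvBuildGraph shortcuts line_dim =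
      (pvOpsLine line_dim ++ pvOpsShort shortcuts line_dim).foldl
        (fun G p => pvGraphAdd G p.1 p.2) PySem.Dict.empty := by
  unfold pvBuildGraph pvOpsLine pvOpsShort
  rw [List.foldl_append, List.foldl_flatMap, List.foldl_flatMap]
  have h1 : (fun (G : PySem.Dict Int PvSet) (i : Int) =>
      pvGraphAdd (pvGraphAdd G i (i + 1)) (i + 1) i) =
      (fun (G : PySem.Dict Int PvSet) (i : Int) =>
        ([(i, i + 1), (i + 1, i)] : List (Int × Int)).foldl (fun G p => pvGraphAdd G p.1 p.2) G) := by
    funext G i; rfl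
  have h2 : (fun (G : PySem.Dict Int PvSet) (p : Int × Int) =>
      if p.1 ≤ line_dim ∧ p.2 ≤ line_dim ∧ p.1 ≠ p.2 then
        pvGraphAdd (pvGraphAdd G p.1 p.2) p.2 p.1
      else G) =
      (fun (G : PySem.Dict Int PvSet) (p : Int × Int) =>
        (if p.1 ≤ line_dim ∧ p.2 ≤ line_dim ∧ p.1 ≠ p.2 then
          ([(p.1, p.2), (p.2, p.1)] : List (Int × Int)) else []).foldl
          (fun G p => pvGraphAdd G p.1 p.2) G) := by
    funext G p
    by_cases hc : p.1 ≤ line_dim ∧ p.2 ≤ line_dim ∧ p.1 ≠ p.2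
    · simp [hc]
    · simp [hc]
  rw [h1, h2]

lemma pvProj (u : Int) :
    ∀ (ops : List (Int × Int)) (G : PySem.Dict Int PvSet),
      (ops.foldl (fun G p => pvGraphAdd G p.1 p.2) G).getD u pvSetEmpty =
        ops.foldl (pvStep' u) (G.getD u pvSetEmpty) := by
  
  intro ops
  induction ops with
  | nil => intro G; rfl
  | cons a ops ih =>
    intro G
    rw [List.foldl_cons, List.foldl_cons, ih]
    congr 1
    unfold pvGraphAdd pvStep'
    rw [PySem.Dict.getD_insert]
    by_cases h : a.1 = u
    · simp [h]
    · simp [h, Ne.symm h]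

lemma pvFilterFold (u : Int) :
    ∀ (ops : List (Int × Int)) (s : PvSet),
      ops.foldl (pvStep' u) s =
        ((ops.filter (fun p => p.1 == u)).map (·.2)).foldl pvSetAdd s := by
  
  intro ops
  induction ops with
  | nil => intro s; rfl
  | cons a ops ih =>
    intro s
    rw [List.foldl_cons, List.filter_cons]
    by_cases h : a.1 = u
    · simp only [h, beq_self_eq_true, if_true, List.map_cons, List.foldl_cons]
      rw [ih]
      simp [pvStep', h]
    · have hb : (a.1 == u) = false := by simp [h]
      rw [hb]
      simp only [Bool.false_eq_true, if_false]
      rw [ih]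
      simp [pvStep', h]

lemma pvLineFilter (line_dim u : Int) :
    ∀ (a : Int),
      (((PySem.List.pyRange a line_dim 1).flatMap (fun i => [(i, i + 1), (i + 1, i)])).filter
          (fun p => p.1 == u)).map (·.2) =
        (if a + 1 ≤ u ∧ u ≤ line_dim then [u - 1] else []) ++
          (if a ≤ u ∧ u < line_dim then [u + 1] else []) := by
  suffices H : ∀ (n : Nat) (a : Int), (line_dim - a).toNat ≤ n →
      (((PySem.List.pyRange a line_dim 1).flatMap (fun i => [(i, i + 1), (i + 1, i)])).filter
          (fun p => p.1 == u)).map (·.2) =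
        (if a + 1 ≤ u ∧ u ≤ line_dim then [u - 1] else []) ++
          (if a ≤ u ∧ u < line_dim then [u + 1] else []) by
    exact fun a => H (line_dim - a).toNat a le_rfl
  intro n
  induction n with
  | zero =>
    intro a ha
    have hle : line_dim ≤ a := by omega
    rw [PySem.List.pyRange_one_eq_nil hle]
    rw [if_neg (by omega), if_neg (by omega)]
    rfl
  | succ n ih =>
    intro a ha
    by_cases hb : line_dim ≤ a
    · rw [PySem.List.pyRange_one_eq_nil hb]
      rw [if_neg (by omega), if_neg (by omega)]
      rfl
    · have hab : a < line_dim := by omega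
      rw [PySem.List.pyRange_one_cons hab, List.flatMap_cons, List.filter_append,
        List.map_append, ih (a + 1) (by omega)]
      by_cases h1 : a = u
      · subst h1
        have hhead : ((([(a, a + 1), (a + 1, a)] : List (Int × Int))).filter
            (fun p => p.1 == a)).map (·.2) = [a + 1] := by
          have e2 : ((a + 1 : Int) == a) = false := by
            simp only [beq_eq_false_iff_ne, ne_eq]; omega
          simp [List.filter_cons, e2]
        rw [hhead]
        rw [if_neg (by omega : ¬(a + 1 + 1 ≤ a ∧ a ≤ line_dim)),
          if_neg (by omega : ¬(a + 1 ≤ a ∧ a < line_dim)),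
          if_neg (by omega : ¬(a + 1 ≤ a ∧ a ≤ line_dim)),
          if_pos (⟨le_refl a, hab⟩ : a ≤ a ∧ a < line_dim)]
        rfl
      · by_cases h2 : a + 1 = u
        · have hhead : ((([(a, a + 1), (a + 1, a)] : List (Int × Int))).filter
              (fun p => p.1 == u)).map (·.2) = [u - 1] := by
            have e1 : ((a : Int) == u) = false := by
              simp only [beq_eq_false_iff_ne, ne_eq]; omega
            have e2 : ((a + 1 : Int) == u) = true := by simp [h2]
            simp only [List.filter_cons, e1, e2, Bool.false_eq_true, if_false, if_true,
              List.filter_nil, List.map_cons, List.map_nil]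
            have : a = u - 1 := by omega
            rw [this]
          rw [hhead]
          have e4 : (a + 1 ≤ u ∧ u < line_dim) ↔ (a ≤ u ∧ u < line_dim) := by
            constructor <;> (intro hh; exact ⟨by omega, hh.2⟩)
          rw [if_neg (by omega : ¬(a + 1 + 1 ≤ u ∧ u ≤ line_dim)),
            if_pos (⟨by omega, by omega⟩ : a + 1 ≤ u ∧ u ≤ line_dim)]
          simp only [e4]
          rfl
        · have hhead : ((([(a, a + 1), (a + 1, a)] : List (Int × Int))).filter
              (fun p => p.1 == u)).map (·.2) = [] := by
            have e1 : ((a : Int) == u) = false := by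
              simp only [beq_eq_false_iff_ne, ne_eq]; omega
            have e2 : ((a + 1 : Int) == u) = false := by
              simp only [beq_eq_false_iff_ne, ne_eq]; omega
            simp [List.filter_cons, e1, e2]
          rw [hhead]
          have e3 : (a + 1 + 1 ≤ u ∧ u ≤ line_dim) ↔ (a + 1 ≤ u ∧ u ≤ line_dim) := by
            constructor <;> (intro hh; exact ⟨by omega, hh.2⟩)
          have e4 : (a + 1 ≤ u ∧ u < line_dim) ↔ (a ≤ u ∧ u < line_dim) := by
            constructor <;> (intro hh; exact ⟨by omega, hh.2⟩)
          simp only [e3, e4]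
          rfl

lemma pvPendBridge (shortcuts : List (Int × Int)) (line_dim : Int) :
    pvPend shortcuts line_dim =
      (pvOpsShort shortcuts line_dim).foldl
        (fun d p => d.modify p.1 [] (· ++ [p.2])) PySem.Dict.empty := by
  
  unfold pvPend pvOpsShort
  rw [List.foldl_flatMap]
  congr 1
  funext d p
  by_cases hc : p.1 ≤ line_dim ∧ p.2 ≤ line_dim ∧ p.1 ≠ p.2
  · simp [hc, List.foldl]
  · simp [hc, List.foldl]

lemma pvPendProj (shortcuts : List (Int × Int)) (line_dim u : Int) :
    (pvPend shortcuts line_dim).getD u [] =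
      ((pvOpsShort shortcuts line_dim).filter (fun p => p.1 == u)).map (·.2) := by
  
  rw [pvPendBridge, PySem.Dict.getD_foldl_modify_append, PySem.Dict.getD_empty]
  simp

lemma pvNbrsEq (shortcuts : List (Int × Int)) (line_dim u : Int) :
    pvNbrsB (pvPend shortcuts line_dim) line_dim u = pvNbrs (pvBuildGraph shortcuts line_dim) u := by
  
  simp only [pvNbrsB, pvNbrs]
  rw [pvBridgeA, pvProj, PySem.Dict.getD_empty, List.foldl_append]
  rw [pvFilterFold u (pvOpsLine line_dim), pvFilterFold u (pvOpsShort shortcuts line_dim)]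
  rw [pvPendProj]
  congr 1
  unfold pvOpsLine
  rw [pvLineFilter line_dim u 0, List.foldl_append]
  have h01 : ((0 : Int) + 1 ≤ u ∧ u ≤ line_dim) ↔ (1 ≤ u ∧ u ≤ line_dim) := by norm_num
  by_cases hc1 : 1 ≤ u ∧ u ≤ line_dim <;> by_cases hc2 : 0 ≤ u ∧ u < line_dim
  · rw [if_pos hc1, if_pos hc2, if_pos (h01.mpr hc1), if_pos hc2]
    rfl
  · rw [if_pos hc1, if_neg hc2, if_pos (h01.mpr hc1), if_neg hc2]
    rfl
  · rw [if_neg hc1, if_pos hc2, if_neg (fun h => hc1 (h01.mp h)), if_pos hc2]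
    rfl
  · rw [if_neg hc1, if_neg hc2, if_neg (fun h => hc1 (h01.mp h)), if_neg hc2]
    rfl

-- ---------- B's inlined push fold is A's push fold with the state pair swapped ----------

lemma pvPushSwap (u : Int) :
    ∀ (vs : List Int) (q : List Int) (p : PySem.Dict Int (Option Int)),
      vs.foldl (fun st v => if st.1.contains v then st else (st.1.insert v (some u), st.2 ++ [v]))
          (p, q) =
        ((vs.foldl (pvBfsPush u) (q, p)).2, (vs.foldl (pvBfsPush u) (q, p)).1) := by
  
  intro vs
  induction vs with
  | nil => intro q p; rfl
  | cons v vs ih =>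
    intro q p
    rw [List.foldl_cons, List.foldl_cons]
    by_cases hv : p.contains v = true
    · simp only [pvBfsPush, hv, if_true]
      exact ih q p
    · have hvf : p.contains v = false := by
        cases h : p.contains v with
        | false => rfl
        | true => exact absurd h hv
      simp only [pvBfsPush, hvf, Bool.false_eq_true, if_false]
      exact ih (q ++ [v]) (p.insert v (some u))

lemma pvLoopEq (shortcuts : List (Int × Int)) (line_dim : Int) :
    ∀ (f : Nat) (q : List Int) (p : PySem.Dict Int (Option Int)),
      pvBfsFull (pvPend shortcuts line_dim) line_dim f q p =
        pvBfsLoopB (pvBuildGraph shortcuts line_dim) f q p := by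
  intro f
  induction f with
  | zero => intro q p; rfl
  | succ f ih =>
    intro q p
    cases q with
    | nil => rfl
    | cons u q =>
      rcases hs : pvBfsStep (pvBuildGraph shortcuts line_dim) u q p with ⟨q', p'⟩
      have hstep : (pvNbrsB (pvPend shortcuts line_dim) line_dim u).foldl (pvBfsPush u) (q, p) = (q', p') := by
        rw [pvNbrsEq]; exact hs
      have hsw := pvPushSwap u (pvNbrsB (pvPend shortcuts line_dim) line_dim u) q p
      rw [hstep] at hsw
      have hB : pvBfsLoopB (pvBuildGraph shortcuts line_dim) (f + 1) (u :: q) p =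
          pvBfsLoopB (pvBuildGraph shortcuts line_dim) f q' p' := by
        simp only [pvBfsLoopB, hs]
      have hL : pvBfsFull (pvPend shortcuts line_dim) line_dim (f + 1) (u :: q) p =
          pvBfsFull (pvPend shortcuts line_dim) line_dim f q' p' := by
        show pvBfsFull (pvPend shortcuts line_dim) line_dim f
            ((pvNbrsB (pvPend shortcuts line_dim) line_dim u).foldl
              (fun st v => if st.1.contains v then st else (st.1.insert v (some u), st.2 ++ [v])) (p, q)).2
            ((pvNbrsB (pvPend shortcuts line_dim) line_dim u).foldl
              (fun st v => if st.1.contains v then st else (st.1.insert v (some u), st.2 ++ [v])) (p, q)).1 =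
          pvBfsFull (pvPend shortcuts line_dim) line_dim f q' p'
        rw [hsw]
      rw [hL, hB]
      exact ih q' p'

-- ---------- shared invariants of the two BFS loops (chain-closed parent dicts) ----------

def pvKeysOf (l : List (Int × Option Int)) : List Int := l.map Prod.fst

-- "chain-closed": the parent stored with any entry occurs as a key strictly earlier
def pvCC (l : List (Int × Option Int)) : Prop :=
  ∀ l1 k v l2, l = l1 ++ (k, some v) :: l2 → v ∈ pvKeysOf l1

-- every queued node already has a parent entry
def pvQI (q : List Int) (p : PySem.Dict Int (Option Int)) : Prop :=
  ∀ u ∈ q, p.contains u = true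

-- p' extends p by entries whose keys are fresh
def pvFresh (p p' : PySem.Dict Int (Option Int)) : Prop :=
  ∃ e, p'.items = p.items ++ e ∧ ∀ kv ∈ e, p.contains kv.1 = false

lemma pvFresh_refl (p : PySem.Dict Int (Option Int)) : pvFresh p p :=
  ⟨[], by simp, by simp⟩

lemma pvContains_iff (p : PySem.Dict Int (Option Int)) (k : Int) :
    p.contains k = true ↔ k ∈ pvKeysOf p.items := by
  rw [PySem.Dict.contains_iff_mem_keys]
  rfl

lemma pvContains_mono {p p' : PySem.Dict Int (Option Int)} (h : pvFresh p p') (k : Int) :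
    p.contains k = true → p'.contains k = true := by
  obtain ⟨e, he, -⟩ := h
  rw [pvContains_iff, pvContains_iff, he]
  intro hk
  simp only [pvKeysOf, List.map_append, List.mem_append] at *
  exact Or.inl hk

lemma pvFresh_trans {p q r : PySem.Dict Int (Option Int)}
    (h1 : pvFresh p q) (h2 : pvFresh q r) : pvFresh p r := by
  obtain ⟨e1, he1, hf1⟩ := h1
  obtain ⟨e2, he2, hf2⟩ := h2
  refine ⟨e1 ++ e2, by rw [he2, he1, List.append_assoc], ?_⟩
  intro kv hkv
  rcases List.mem_append.1 hkv with h | h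
  · exact hf1 kv h
  · by_contra hc
    have hpk : p.contains kv.1 = true := by
      cases hcc : p.contains kv.1 with
      | false => exact absurd hcc hc
      | true => rfl
    have := pvContains_mono ⟨e1, he1, hf1⟩ kv.1 hpk
    rw [hf2 kv h] at this
    exact Bool.false_ne_true this

-- splitting a snoc list around a designated cell
lemma pvSplit_snoc {α : Type} (l : List α) (x : α) :
    ∀ l1 a l2, l ++ [x] = l1 ++ a :: l2 →
      (l1 = l ∧ a = x ∧ l2 = []) ∨ ∃ l2', l = l1 ++ a :: l2' := by
  induction l with
  | nil =>
    intro l1 a l2 h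
    cases l1 with
    | nil =>
      simp only [List.nil_append, List.cons.injEq] at h
      exact Or.inl ⟨rfl, h.1.symm, h.2.symm⟩
    | cons c l1' =>
      simp only [List.nil_append, List.cons_append, List.cons.injEq] at h
      exact absurd h.2 (by simp)
  | cons b l' ih =>
    intro l1 a l2 h
    cases l1 with
    | nil =>
      simp only [List.cons_append, List.nil_append, List.cons.injEq] at h
      exact Or.inr ⟨l', by simp [h.1]⟩
    | cons c l1' =>
      simp only [List.cons_append, List.cons.injEq] at h
      rcases ih l1' a l2 h.2 with ⟨h1, h2, h3⟩ | ⟨l2', hl⟩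
      · exact Or.inl ⟨by simp [h.1, h1], h2, h3⟩
      · exact Or.inr ⟨l2', by simp [h.1, hl]⟩

lemma pvCC_snoc {l : List (Int × Option Int)} {v u : Int}
    (hcc : pvCC l) (hu : u ∈ pvKeysOf l) : pvCC (l ++ [(v, some u)]) := by
  intro l1 k w l2 h
  rcases pvSplit_snoc l (v, some u) l1 (k, some w) l2 h with ⟨h1, h2, -⟩ | ⟨l2', hl⟩
  · cases h2; cases h1; exact hu
  · exact hcc l1 k w l2' hl

-- properties of the inner push loop
lemma pvPush_aux (u : Int) :
    ∀ (vs : List Int) (q : List Int) (p : PySem.Dict Int (Option Int)),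
      p.contains u = true → pvQI q p → pvCC p.items →
      pvFresh p (vs.foldl (pvBfsPush u) (q, p)).2 ∧
      pvQI (vs.foldl (pvBfsPush u) (q, p)).1 (vs.foldl (pvBfsPush u) (q, p)).2 ∧
      pvCC (vs.foldl (pvBfsPush u) (q, p)).2.items := by
  intro vs
  induction vs with
  | nil => intro q p hu hq hcc; exact ⟨pvFresh_refl p, hq, hcc⟩
  | cons v vs ih =>
    intro q p hu hq hcc
    rw [List.foldl_cons]
    by_cases hv : p.contains v = true
    · simp only [pvBfsPush, hv, if_true]
      exact ih q p hu hq hcc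
    · have hvf : p.contains v = false := by
        cases h : p.contains v with
        | false => rfl
        | true => exact absurd h hv
      simp only [pvBfsPush, hvf, Bool.false_eq_true, if_false]
      have hitems : (p.insert v (some u)).items = p.items ++ [(v, some u)] :=
        PySem.Dict.items_insert_of_not_contains p (some u) hvf
      have hfresh : pvFresh p (p.insert v (some u)) :=
        ⟨[(v, some u)], hitems, by intro kv hkv; simp at hkv; rw [hkv]; exact hvf⟩
      have hu' : (p.insert v (some u)).contains u = true := pvContains_mono hfresh u hu
      have hq' : pvQI (q ++ [v]) (p.insert v (some u)) := by
        intro w hw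
        rcases List.mem_append.1 hw with h | h
        · exact pvContains_mono hfresh w (hq w h)
        · simp at h; rw [h]; exact PySem.Dict.contains_insert_self _ _ _
      have hcc' : pvCC (p.insert v (some u)).items := by
        rw [hitems]
        exact pvCC_snoc hcc ((pvContains_iff p u).1 hu)
      obtain ⟨f1, f2, f3⟩ := ih (q ++ [v]) (p.insert v (some u)) hu' hq' hcc'
      exact ⟨pvFresh_trans hfresh f1, f2, f3⟩

lemma pvPush_fresh (u : Int) :
    ∀ (vs : List Int) (q : List Int) (p : PySem.Dict Int (Option Int)),
      pvFresh p (vs.foldl (pvBfsPush u) (q, p)).2 := by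
  intro vs
  induction vs with
  | nil => intro q p; exact pvFresh_refl p
  | cons v vs ih =>
    intro q p
    rw [List.foldl_cons]
    by_cases hv : p.contains v = true
    · simp only [pvBfsPush, hv, if_true]; exact ih q p
    · have hvf : p.contains v = false := by
        cases h : p.contains v with
        | false => rfl
        | true => exact absurd h hv
      simp only [pvBfsPush, hvf, Bool.false_eq_true, if_false]
      have hitems : (p.insert v (some u)).items = p.items ++ [(v, some u)] :=
        PySem.Dict.items_insert_of_not_contains p (some u) hvf
      have hfresh : pvFresh p (p.insert v (some u)) :=
        ⟨[(v, some u)], hitems, by intro kv hkv; simp at hkv; rw [hkv]; exact hvf⟩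
      exact pvFresh_trans hfresh (ih _ _)

lemma pvLoopB_fresh (G : PySem.Dict Int PvSet) :
    ∀ (f : Nat) (q : List Int) (p : PySem.Dict Int (Option Int)),
      pvFresh p (pvBfsLoopB G f q p) := by
  intro f
  induction f with
  | zero => intro q p; exact pvFresh_refl p
  | succ f ih =>
    intro q p
    cases q with
    | nil => exact pvFresh_refl p
    | cons u q =>
      rcases hs : pvBfsStep G u q p with ⟨q', p'⟩
      have hstep : pvFresh p p' := by
        have := pvPush_fresh u (pvNbrs G u) q p
        rw [show (pvNbrs G u).foldl (pvBfsPush u) (q, p) = (q', p') from hs] at this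
        exact this
      have : pvBfsLoopB G (f + 1) (u :: q) p = pvBfsLoopB G f q' p' := by
        simp only [pvBfsLoopB, hs]
      rw [this]
      exact pvFresh_trans hstep (ih q' p')

lemma pvLoopA_CC (G : PySem.Dict Int PvSet) (goal : Int) :
    ∀ (f : Nat) (q : List Int) (p : PySem.Dict Int (Option Int)),
      pvQI q p → pvCC p.items → pvCC (pvBfsLoopA G goal f q p).items := by
  intro f
  induction f with
  | zero => intro q p _ hcc; exact hcc
  | succ f ih =>
    intro q p hq hcc
    cases q with
    | nil => exact hcc
    | cons u q =>
      by_cases hu : u = goal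
      · simp only [pvBfsLoopA, hu, if_true]; exact hcc
      · rcases hs : pvBfsStep G u q p with ⟨q', p'⟩
        have hprops := pvPush_aux u (pvNbrs G u) q p (hq u (by simp)) (fun w hw => hq w (by simp [hw])) hcc
        rw [show (pvNbrs G u).foldl (pvBfsPush u) (q, p) = (q', p') from hs] at hprops
        have : pvBfsLoopA G goal (f + 1) (u :: q) p = pvBfsLoopA G goal f q' p' := by
          simp only [pvBfsLoopA, hu, if_false, hs]
        rw [this]
        exact ih q' p' hprops.2.1 hprops.2.2

lemma pvLoopB_CC (G : PySem.Dict Int PvSet) :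
    ∀ (f : Nat) (q : List Int) (p : PySem.Dict Int (Option Int)),
      pvQI q p → pvCC p.items → pvCC (pvBfsLoopB G f q p).items := by
  
  intro f
  induction f with
  | zero => intro q p _ hcc; exact hcc
  | succ f ih =>
    intro q p hq hcc
    cases q with
    | nil => exact hcc
    | cons u q =>
      rcases hs : pvBfsStep G u q p with ⟨q', p'⟩
      have hprops := pvPush_aux u (pvNbrs G u) q p (hq u (by simp)) (fun w hw => hq w (by simp [hw])) hcc
      rw [show (pvNbrs G u).foldl (pvBfsPush u) (q, p) = (q', p') from hs] at hprops
      have : pvBfsLoopB G (f + 1) (u :: q) p = pvBfsLoopB G f q' p' := by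
        simp only [pvBfsLoopB, hs]
      rw [this]
      exact ih q' p' hprops.2.1 hprops.2.2

-- A's broken-off BFS against the full BFS: either identical, or A already holds the
-- goal and the full BFS only appends fresh entries
lemma pvLoopAB (G : PySem.Dict Int PvSet) (goal : Int) :
    ∀ (f : Nat) (q : List Int) (p : PySem.Dict Int (Option Int)),
      pvQI q p → pvCC p.items →
      pvBfsLoopA G goal f q p = pvBfsLoopB G f q p ∨
      ((pvBfsLoopA G goal f q p).contains goal = true ∧
        pvFresh (pvBfsLoopA G goal f q p) (pvBfsLoopB G f q p)) := by
  intro f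
  induction f with
  | zero => intro q p _ _; exact Or.inl rfl
  | succ f ih =>
    intro q p hq hcc
    cases q with
    | nil => exact Or.inl rfl
    | cons u q =>
      by_cases hu : u = goal
      · refine Or.inr ?_
        have hA : pvBfsLoopA G goal (f + 1) (u :: q) p = p := by
          simp only [pvBfsLoopA, hu, if_true]
        rw [hA]
        exact ⟨hu ▸ hq u (by simp), pvLoopB_fresh G (f + 1) (u :: q) p⟩
      · rcases hs : pvBfsStep G u q p with ⟨q', p'⟩
        have hprops := pvPush_aux u (pvNbrs G u) q p (hq u (by simp)) (fun w hw => hq w (by simp [hw])) hcc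
        rw [show (pvNbrs G u).foldl (pvBfsPush u) (q, p) = (q', p') from hs] at hprops
        have hA : pvBfsLoopA G goal (f + 1) (u :: q) p = pvBfsLoopA G goal f q' p' := by
          simp only [pvBfsLoopA, hu, if_false, hs]
        have hB : pvBfsLoopB G (f + 1) (u :: q) p = pvBfsLoopB G f q' p' := by
          simp only [pvBfsLoopB, hs]
        rw [hA, hB]
        exact ih q' p' hprops.2.1 hprops.2.2

-- lookup lemmas on association lists
lemma pvGet_append_left :
    ∀ (l e : List (Int × Option Int)) (k : Int), k ∈ pvKeysOf l →
      (PySem.Dict.mk (l ++ e)).get? k = (PySem.Dict.mk l).get? k := by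
  intro l
  induction l with
  | nil => intro e k hk; exact absurd hk (by simp [pvKeysOf])
  | cons a l ih =>
    intro e k hk
    rw [List.cons_append, PySem.Dict.get?_mk_cons, PySem.Dict.get?_mk_cons]
    by_cases h : a.1 = k
    · simp [h]
    · have hne : (a.1 == k) = false := by simp [h]
      rw [hne]
      simp only [Bool.false_eq_true, if_false]
      have : k ∈ pvKeysOf l := by
        simp only [pvKeysOf, List.map_cons, List.mem_cons] at hk
        rcases hk with hk | hk
        · exact absurd hk.symm h
        · exact hk
      exact ih e k this

lemma pvGet_first :
    ∀ (l1 : List (Int × Option Int)) (k : Int) (v : Option Int) (l2 : List (Int × Option Int)),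
      k ∉ pvKeysOf l1 →
      (PySem.Dict.mk (l1 ++ (k, v) :: l2)).get? k = some v := by
  intro l1
  induction l1 with
  | nil => intro k v l2 _; rw [List.nil_append, PySem.Dict.get?_mk_cons]; simp
  | cons a l1 ih =>
    intro k v l2 hk
    rw [List.cons_append, PySem.Dict.get?_mk_cons]
    have h1 : k ≠ a.1 := by
      intro h; exact hk (by simp [pvKeysOf, h])
    have hne : (a.1 == k) = false := by simp [Ne.symm h1]
    rw [hne]
    simp only [Bool.false_eq_true, if_false]
    exact ih k v l2 (fun h => hk (by simp [pvKeysOf] at h ⊢; exact Or.inr h))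

-- first occurrence of a present key, with its position
lemma pvFirst_split :
    ∀ (l : List (Int × Option Int)) (k : Int), k ∈ pvKeysOf l →
      ∃ m1 w m2, l = m1 ++ (k, w) :: m2 ∧ k ∉ pvKeysOf m1 ∧ m1.length < l.length := by
  intro l
  induction l with
  | nil => intro k hk; exact absurd hk (by simp [pvKeysOf])
  | cons a l ih =>
    intro k hk
    by_cases h : a.1 = k
    · exact ⟨[], a.2, l, by simp [← h], by simp [pvKeysOf], by simp⟩
    · have : k ∈ pvKeysOf l := by
        simp only [pvKeysOf, List.map_cons, List.mem_cons] at hk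
        rcases hk with hk | hk
        · exact absurd hk.symm h
        · exact hk
      obtain ⟨m1, w, m2, h1, h2, h3⟩ := ih k this
      refine ⟨a :: m1, w, m2, by simp [h1], ?_, by simpa using Nat.succ_lt_succ h3⟩
      intro hmem
      simp only [pvKeysOf, List.map_cons, List.mem_cons] at hmem
      rcases hmem with hm | hm
      · exact h hm.symm
      · exact h2 hm

-- the parent walk agrees between the broken-off dict and its fresh extension
lemma pvWalk_eq (pa pb : PySem.Dict Int (Option Int)) (e : List (Int × Option Int))
    (hext : pb.items = pa.items ++ e) (hcc : pvCC pa.items) :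
    ∀ (n : Nat) (l1 : List (Int × Option Int)) (c : Int) (val : Option Int)
      (l2 : List (Int × Option Int)) (f1 f2 : Nat) (acc : List Int),
      pa.items = l1 ++ (c, val) :: l2 → c ∉ pvKeysOf l1 → l1.length = n →
      n + 2 ≤ f1 → n + 2 ≤ f2 →
      pvWalk pa f1 (some c) acc = pvWalk pb f2 (some c) acc := by
  intro n
  induction n using Nat.strong_induction_on with
  | _ n IH =>
    intro l1 c val l2 f1 f2 acc hsplit hnot hlen hf1 hf2
    obtain ⟨g1, rfl⟩ : ∃ g, f1 = g + 1 := ⟨f1 - 1, by omega⟩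
    obtain ⟨g2, rfl⟩ : ∃ g, f2 = g + 1 := ⟨f2 - 1, by omega⟩
    have hga : pa.get? c = some val := by
      have : pa.get? c = (PySem.Dict.mk pa.items).get? c := rfl
      rw [this, hsplit]
      exact pvGet_first l1 c val l2 hnot
    have hcmem : c ∈ pvKeysOf pa.items := by
      rw [hsplit]; simp [pvKeysOf]
    have hgb : pb.get? c = some val := by
      have h1 : pb.get? c = (PySem.Dict.mk pb.items).get? c := rfl
      rw [h1, hext, pvGet_append_left pa.items e c hcmem]
      rw [show (PySem.Dict.mk pa.items).get? c = pa.get? c from rfl, hga]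
    have hda : pa.getD c none = val := by
      rw [PySem.Dict.getD_eq_get?_getD, hga]; rfl
    have hdb : pb.getD c none = val := by
      rw [PySem.Dict.getD_eq_get?_getD, hgb]; rfl
    show pvWalk pa g1 (pa.getD c none) (acc ++ [c]) = pvWalk pb g2 (pb.getD c none) (acc ++ [c])
    rw [hda, hdb]
    cases val with
    | none =>
      obtain ⟨g1', rfl⟩ : ∃ g, g1 = g + 1 := ⟨g1 - 1, by omega⟩
      obtain ⟨g2', rfl⟩ : ∃ g, g2 = g + 1 := ⟨g2 - 1, by omega⟩
      rfl
    | some v =>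
      have hv : v ∈ pvKeysOf l1 := hcc l1 c v l2 hsplit
      have hvmem : v ∈ pvKeysOf pa.items := by
        rw [hsplit]; simp only [pvKeysOf, List.map_append, List.mem_append]; exact Or.inl hv
      obtain ⟨m1, w, m2, h1, h2, h3⟩ := pvFirst_split pa.items v hvmem
      have hm1lt : m1.length < n := by
        by_contra hge
        simp only [not_lt] at hge
        have hpre1 : (l1 ++ (c, some v) :: l2).take m1.length = m1 := by
          rw [← hsplit, h1]; simp
        have hl1pre : l1 <+: (l1 ++ (c, some v) :: l2).take m1.length := by
          rw [List.prefix_take_iff]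
          exact ⟨⟨(c, some v) :: l2, rfl⟩, hlen ▸ hge⟩
        rw [hpre1] at hl1pre
        obtain ⟨t, ht⟩ := hl1pre
        apply h2
        rw [← ht]
        simp only [pvKeysOf, List.map_append, List.mem_append]
        exact Or.inl hv
      exact IH m1.length hm1lt m1 v w m2 g1 g2 (acc ++ [c]) h1 h2 rfl (by omega) (by omega)

-- A's per-goal bfs_path read off the full BFS's single parent tree
lemma pvPath_eq_alt (G : PySem.Dict Int PvSet) (F : Nat) (i : Int) :
    pvBfsPath G F 0 i =
      (if (pvBfsLoopB G F [0] (PySem.Dict.empty.insert 0 none)).contains i then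
        some ((pvWalk (pvBfsLoopB G F [0] (PySem.Dict.empty.insert 0 none))
          ((pvBfsLoopB G F [0] (PySem.Dict.empty.insert 0 none)).size + 1)
          (some i) []).reverse)
      else none) := by
  have hQI : pvQI [0] (PySem.Dict.empty.insert 0 (none : Option Int)) := by
    intro u hu
    simp only [List.mem_singleton] at hu
    rw [hu]
    exact PySem.Dict.contains_insert_self _ _ _
  have hitems : (PySem.Dict.empty.insert 0 (none : Option Int)).items = [((0 : Int), (none : Option Int))] := by
    rw [PySem.Dict.items_insert_of_not_contains PySem.Dict.empty none (PySem.Dict.contains_empty 0)]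
    rfl
  have hCC : pvCC (PySem.Dict.empty.insert 0 (none : Option Int)).items := by
    rw [hitems]
    intro l1 k v l2 h
    cases l1 with
    | nil => simp at h
    | cons a l1 => simp at h
  rcases pvLoopAB G i F [0] (PySem.Dict.empty.insert 0 none) hQI hCC with heq | ⟨hc, hfresh⟩
  · unfold pvBfsPath
    rw [heq]
  · have hcb := pvContains_mono hfresh i hc
    unfold pvBfsPath
    simp only [hc, hcb, if_true]
    obtain ⟨e, hext, -⟩ := hfresh
    have hccA := pvLoopA_CC G i F [0] (PySem.Dict.empty.insert 0 none) hQI hCC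
    set pa := pvBfsLoopA G i F [0] (PySem.Dict.empty.insert 0 none) with hpa
    set pb := pvBfsLoopB G F [0] (PySem.Dict.empty.insert 0 none) with hpb
    obtain ⟨m1, w, m2, h1, h2, h3⟩ := pvFirst_split pa.items i ((pvContains_iff pa i).1 hc)
    have hsa : pa.size = pa.items.length := rfl
    have hsb : pb.size = pb.items.length := rfl
    have hlen : pa.items.length ≤ pb.items.length := by
      rw [hext, List.length_append]; omega
    rw [pvWalk_eq pa pb e hext hccA m1.length m1 i w m2 (pa.size + 1) (pb.size + 1) []
      h1 h2 rfl (by omega) (by omega)]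

-- ---------- B's edge-list walk is the zip of A's node walk ----------

lemma pvWalk_acc (p : PySem.Dict Int (Option Int)) :
    ∀ (f : Nat) (oc : Option Int) (acc : List Int),
      pvWalk p f oc acc = acc ++ pvWalk p f oc [] := by
  
  intro f
  induction f with
  | zero => intro oc acc; simp [pvWalk]
  | succ f ih =>
    intro oc acc
    cases oc with
    | none => simp [pvWalk]
    | some c =>
      show pvWalk p f (p.getD c none) (acc ++ [c]) = acc ++ pvWalk p f (p.getD c none) ([] ++ [c])
      rw [ih (p.getD c none) (acc ++ [c]), ih (p.getD c none) ([] ++ [c])]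
      simp

lemma pvPairs_zip (p : PySem.Dict Int (Option Int)) (hcc : pvCC p.items) :
    ∀ (n : Nat) (l1 : List (Int × Option Int)) (c : Int) (val : Option Int)
      (l2 : List (Int × Option Int)) (f : Nat),
      p.items = l1 ++ (c, val) :: l2 → c ∉ pvKeysOf l1 → l1.length = n → n + 2 ≤ f →
      pvPairs p f c =
        (pvWalk p f (some c) []).zip (pvWalk p f (some c) []).tail := by
  
  intro n
  induction n using Nat.strong_induction_on with
  | _ n IH =>
    intro l1 c val l2 f hsplit hnot hlen hf
    obtain ⟨g, rfl⟩ : ∃ g, f = g + 1 := ⟨f - 1, by omega⟩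
    have hga : p.get? c = some val := by
      have : p.get? c = (PySem.Dict.mk p.items).get? c := rfl
      rw [this, hsplit]
      exact pvGet_first l1 c val l2 hnot
    have hda : p.getD c none = val := by
      rw [PySem.Dict.getD_eq_get?_getD, hga]; rfl
    have hwalk : pvWalk p (g + 1) (some c) [] = [c] ++ pvWalk p g val [] := by
      show pvWalk p g (p.getD c none) ([] ++ [c]) = [c] ++ pvWalk p g val []
      rw [hda, pvWalk_acc p g val ([] ++ [c])]
      simp
    cases val with
    | none =>
      have hp : pvPairs p (g + 1) c = [] := by
        show (match p.getD c none with | none => [] | some v => (c, v) :: pvPairs p g v) = []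
        rw [hda]
      have hnil : pvWalk p g none [] = [] := by cases g <;> rfl
      rw [hp, hwalk, hnil]
      simp
    | some v =>
      have hp : pvPairs p (g + 1) c = (c, v) :: pvPairs p g v := by
        show (match p.getD c none with | none => [] | some v => (c, v) :: pvPairs p g v) = _
        rw [hda]
      obtain ⟨h, rfl⟩ : ∃ h, g = h + 1 := ⟨g - 1, by omega⟩
      have hchainv : pvWalk p (h + 1) (some v) [] = [v] ++ pvWalk p h (p.getD v none) [] := by
        show pvWalk p h (p.getD v none) ([] ++ [v]) = [v] ++ pvWalk p h (p.getD v none) []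
        rw [pvWalk_acc p h (p.getD v none) ([] ++ [v])]
        simp
      have hv : v ∈ pvKeysOf l1 := hcc l1 c v l2 hsplit
      have hvmem : v ∈ pvKeysOf p.items := by
        rw [hsplit]; simp only [pvKeysOf, List.map_append, List.mem_append]; exact Or.inl hv
      obtain ⟨m1, w, m2, h1, h2, h3⟩ := pvFirst_split p.items v hvmem
      have hm1lt : m1.length < n := by
        by_contra hge
        simp only [not_lt] at hge
        have hpre1 : (l1 ++ (c, some v) :: l2).take m1.length = m1 := by
          rw [← hsplit, h1]; simp
        have hl1pre : l1 <+: (l1 ++ (c, some v) :: l2).take m1.length := by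
          rw [List.prefix_take_iff]
          exact ⟨⟨(c, some v) :: l2, rfl⟩, hlen ▸ hge⟩
        rw [hpre1] at hl1pre
        obtain ⟨t, ht⟩ := hl1pre
        apply h2
        rw [← ht]
        simp only [pvKeysOf, List.map_append, List.mem_append]
        exact Or.inl hv
      have hIH := IH m1.length hm1lt m1 v w m2 (h + 1) h1 h2 rfl (by omega)
      rw [hp, hIH, hwalk, hchainv]
      rfl

-- zip-with-tail of a reversed list: the reversed, component-swapped edge list
lemma pvZT_snoc {α : Type} :
    ∀ (xs : List α) (a : α) (h : xs ≠ []),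
      (xs ++ [a]).zip (xs ++ [a]).tail =
        xs.zip xs.tail ++ [(xs.getLast h, a)] := by
  intro xs
  induction xs with
  | nil => intro a h; exact absurd rfl h
  | cons x xs ih =>
    intro a h
    cases xs with
    | nil => simp
    | cons y t =>
      have hne : (y :: t) ≠ [] := by simp
      have : ((x :: y :: t) ++ [a]).zip ((x :: y :: t) ++ [a]).tail =
          (x, y) :: ((y :: t) ++ [a]).zip ((y :: t) ++ [a]).tail := by
        simp [List.zip]
      rw [this, ih a hne]
      simp [List.getLast_cons hne]

lemma pvZT_reverse {α : Type} :
    ∀ (xs : List α),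
      xs.reverse.zip xs.reverse.tail = (xs.zip xs.tail).reverse.map Prod.swap := by
  intro xs
  induction xs with
  | nil => simp
  | cons x xs ih =>
    cases xs with
    | nil => simp
    | cons y t =>
      have hne : (y :: t).reverse ≠ [] := by simp
      have hrev : (x :: y :: t).reverse = (y :: t).reverse ++ [x] := by simp
      rw [hrev, pvZT_snoc ((y :: t).reverse) x hne, ih]
      have hlast : ((y :: t).reverse).getLast hne = y := by
        rw [List.getLast_reverse]
        rfl
      rw [hlast]
      have : ((x :: y :: t).zip (x :: y :: t).tail) = (x, y) :: ((y :: t).zip (y :: t).tail) := by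
        simp [List.zip]
      rw [this]
      simp

-- the per-target edge list read off the parent tree is the zip of the node walk
lemma pvPairs_eq_zip (pb : PySem.Dict Int (Option Int)) (hcc : pvCC pb.items) (i : Int)
    (hc : pb.contains i = true) :
    pvPairs pb (pb.size + 1) i =
      (pvWalk pb (pb.size + 1) (some i) []).zip (pvWalk pb (pb.size + 1) (some i) []).tail := by
  obtain ⟨m1, w, m2, h1, h2, h3⟩ := pvFirst_split pb.items i ((pvContains_iff pb i).1 hc)
  have hsz : pb.size = pb.items.length := rfl
  exact pvPairs_zip pb hcc m1.length m1 i w m2 (pb.size + 1) h1 h2 rfl (by omega)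

-- ===== VERDICT (by name: the statement is the Claim_ definition above) =====
theorem write_program_exp3_spec : Claim_equal_write_program_exp3 := by
  unfold Claim_equal_write_program_exp3 Spec_write_program_exp3
  intro shortcuts line_dim _
  simp only [write_program_exp3, write_program_exp3_alt]
  rw [pvLoopEq shortcuts line_dim]
  have hQI : pvQI [0] (PySem.Dict.empty.insert 0 (none : Option Int)) := by
    intro u hu
    simp only [List.mem_singleton] at hu
    rw [hu]
    exact PySem.Dict.contains_insert_self _ _ _
  have hitems : (PySem.Dict.empty.insert 0 (none : Option Int)).items = [((0 : Int), (none : Option Int))] := by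
    rw [PySem.Dict.items_insert_of_not_contains PySem.Dict.empty none (PySem.Dict.contains_empty 0)]
    rfl
  have hCC0 : pvCC (PySem.Dict.empty.insert 0 (none : Option Int)).items := by
    rw [hitems]
    intro l1 k v l2 h
    cases l1 with
    | nil => simp at h
    | cons a l1 => simp at h
  have hccB : pvCC (pvBfsLoopB (pvBuildGraph shortcuts line_dim) (pvFuel shortcuts line_dim) [0]
      (PySem.Dict.empty.insert 0 none)).items :=
    pvLoopB_CC _ _ _ _ hQI hCC0
  set G := pvBuildGraph shortcuts line_dim with hG
  set F := pvFuel shortcuts line_dim with hF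
  set pb := pvBfsLoopB G F [0] (PySem.Dict.empty.insert 0 none) with hpbdef
  have key : ∀ (l : List Int) (acc : List String),
      l.foldl (pvPartA G F) acc = acc ++ l.filterMap (pvPartB pb) := by
    intro l
    induction l with
    | nil => intro acc; simp
    | cons i l ih =>
      intro acc
      rw [List.foldl_cons, List.filterMap_cons]
      by_cases hc : pb.contains i = true
      · have hpath : pvBfsPath G F 0 i =
            some ((pvWalk pb (pb.size + 1) (some i) []).reverse) := by
          rw [pvPath_eq_alt G F i, ← hpbdef, hc]
          simp
        have hpz := pvPairs_eq_zip pb hccB i hc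
        have hA : pvPartA G F acc i = acc ++
            ["(prepare_coffee_l0 ; " ++
              PySem.Str.join " ; " (pvMoves (pvWalk pb (pb.size + 1) (some i) []).reverse) ++
              " ; put_coffee_l" ++ PySem.Int.toStr i ++ " ; (nil | put_coffee_fair_l" ++
              PySem.Int.toStr i ++ ") ; " ++
              PySem.Str.join " ; " (pvMoves (pvWalk pb (pb.size + 1) (some i) [])) ++ ")"] := by
          simp only [pvPartA, hpath, List.reverse_reverse]
        have hback : (pvPairs pb (pb.size + 1) i).map
            (fun cp => "move_l" ++ PySem.Int.toStr cp.1 ++ "_l" ++ PySem.Int.toStr cp.2) =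
            pvMoves (pvWalk pb (pb.size + 1) (some i) []) := by
          rw [hpz]; rfl
        have hgo : (pvPairs pb (pb.size + 1) i).reverse.map
            (fun cp => "move_l" ++ PySem.Int.toStr cp.2 ++ "_l" ++ PySem.Int.toStr cp.1) =
            pvMoves (pvWalk pb (pb.size + 1) (some i) []).reverse := by
          unfold pvMoves
          rw [pvZT_reverse (pvWalk pb (pb.size + 1) (some i) []), hpz, List.map_map]
          rfl
        have hB : pvPartB pb i =
            some ("(prepare_coffee_l0 ; " ++
              PySem.Str.join " ; " (pvMoves (pvWalk pb (pb.size + 1) (some i) []).reverse) ++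
              " ; put_coffee_l" ++ PySem.Int.toStr i ++ " ; (nil | put_coffee_fair_l" ++
              PySem.Int.toStr i ++ ") ; " ++
              PySem.Str.join " ; " (pvMoves (pvWalk pb (pb.size + 1) (some i) [])) ++ ")") := by
          simp only [pvPartB, hc, if_true]
          rw [hback, hgo]
        rw [hA, hB, ih]
        simp
      · have hcf : pb.contains i = false := by
          cases h : pb.contains i with
          | false => rfl
          | true => exact absurd h hc
        have hpath : pvBfsPath G F 0 i = none := by
          rw [pvPath_eq_alt G F i, ← hpbdef, hcf]
          simp
        have hA : pvPartA G F acc i = acc := by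
          simp only [pvPartA, hpath]
        have hB : pvPartB pb i = none := by
          simp only [pvPartB, hcf, Bool.false_eq_true, if_false]
        rw [hA, hB, ih]
  rw [key]
  simp
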